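-- pv_equiv track=rewrite | github.com/C3RV1/LaytonEditor | SADLpy/Compression/Procyon.py | binary_log2
-- ===== SOURCE A (Python) =====
-- def binary_log2(n: int):
--     scale = 12
--     while n > 0:
--         n = n >> 1
--         scale -= 1
--         if scale == 0:
--             break
--     return scale
-- ===== SOURCE B (Python) =====
-- def binary_log2(n: int):
--     if n <= 0:
--         return 12
--     return max(0, 12 - n.bit_length())
-- ===== Notes on version B (the rewrite author's own statement) =====
-- stated objective: idiomatic
-- what changed: Replaces the shift-and-decrement loop with a closed form computed from the input's bit length, clamped to the loop's start and stop values.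
import Mathlib
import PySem

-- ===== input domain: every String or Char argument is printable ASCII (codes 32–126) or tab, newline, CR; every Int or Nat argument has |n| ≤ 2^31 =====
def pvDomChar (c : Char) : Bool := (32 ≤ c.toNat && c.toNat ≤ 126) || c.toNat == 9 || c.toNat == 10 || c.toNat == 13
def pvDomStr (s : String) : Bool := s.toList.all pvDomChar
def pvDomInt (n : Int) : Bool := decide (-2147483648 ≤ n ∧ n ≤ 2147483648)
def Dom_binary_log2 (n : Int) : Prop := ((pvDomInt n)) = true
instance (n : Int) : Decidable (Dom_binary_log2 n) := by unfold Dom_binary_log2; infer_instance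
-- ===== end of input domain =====

-- B replaces A's shift-and-decrement loop by a closed form via the bit length (idiomatic rewrite).

-- ===== PORT A =====
-- A's while loop: scale starts at 12; each iteration halves n, decrements scale,
-- and breaks when scale hits 0. Ported as structural recursion on the remaining
-- scale (as fuel): `binary_log2_loop fuel n` returns the final scale.
def binary_log2_loop : Nat → Int → Int
  | 0, _ => 0                 -- scale reached 0: the Python loop broke and returns 0
  | fuel + 1, n =>
      if n > 0 then binary_log2_loop fuel (PySem.Int.floordiv n 2)  -- n >> 1
      else (fuel + 1 : Nat)   -- loop condition fails: return current scale

def binary_log2 (n : Int) : Int := binary_log2_loop 12 n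

-- ===== PORT B =====
-- n.bit_length() for n > 0 is Nat.log2 n + 1.
def binary_log2_alt (n : Int) : Int :=
  if n ≤ 0 then 12
  else max 0 (12 - ((Nat.log2 n.toNat : Int) + 1))

-- ===== PRECONDITION & SPEC =====
def Spec_binary_log2 (n : Int) (out : Int) : Prop := out = binary_log2_alt n
instance (n : Int) (out : Int) : Decidable (Spec_binary_log2 n out) := by unfold Spec_binary_log2; infer_instance

-- ===== CLAIM (what is proved, stated in full; the proofs are below) =====
def Claim_equal_binary_log2 : Prop := ∀ (n : Int), Dom_binary_log2 n → Spec_binary_log2 n (binary_log2 n)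

-- ===== LEMMAS AND PROOFS =====

lemma binary_log2_loop_pos (fuel : Nat) :
    ∀ (n : Int), 0 < n →
      binary_log2_loop fuel n = max 0 ((fuel : Int) - ((Nat.log2 n.toNat : Int) + 1)) := by
  induction fuel with
  | zero =>
      intro n hn
      simp [binary_log2_loop]
  | succ f ih =>
      intro n hn
      rw [binary_log2_loop]
      rw [if_pos hn]
      have hdiv : PySem.Int.floordiv n 2 = ((n.toNat / 2 : Nat) : Int) := by
        simp [PySem.Int.floordiv, Int.fdiv_eq_ediv]
        omega
      by_cases h2 : 2 ≤ n
      · -- n ≥ 2: halved value still positive, bit length drops by one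
        have hpos : (0 : Int) < PySem.Int.floordiv n 2 := by
          rw [hdiv]; omega
        rw [ih _ hpos]
        have htn : 2 ≤ n.toNat := by omega
        have hlog : Nat.log2 n.toNat = Nat.log2 (n.toNat / 2) + 1 := by
          rw [Nat.log2_def]; simp [htn]
        have : (PySem.Int.floordiv n 2).toNat = n.toNat / 2 := by
          rw [hdiv]; omega
        rw [this, hlog]
        push_cast
        omega
      · -- n = 1: halved value is 0, loop exits with scale = f (or breaks at 0)
        have hn1 : n = 1 := by omega
        subst hn1
        have : PySem.Int.floordiv 1 2 = 0 := by decide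
        rw [this]
        have hlog : Nat.log2 (Int.toNat 1) = 0 := by decide
        rw [hlog]
        cases f with
        | zero => simp [binary_log2_loop]
        | succ g =>
            rw [binary_log2_loop]
            norm_num
            omega

-- ===== VERDICT (by name: the statement is the Claim_ definition above) =====
theorem binary_log2_spec : Claim_equal_binary_log2 := by
  intro n _
  unfold Spec_binary_log2 binary_log2 binary_log2_alt
  by_cases hn : n ≤ 0
  · -- loop never runs
    rw [if_pos hn]
    rw [binary_log2_loop]
    rw [if_neg (by omega)]
    norm_num
  · rw [if_neg hn]
    exact binary_log2_loop_pos 12 n (by omega)
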